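-- pv_equiv track=rewrite | github.com/abdelfattehjarray/PFE | website/extractcode/pdf.py | extract_remaining_text_from_list
-- ===== SOURCE A (Python) =====
-- def extract_remaining_text_from_list(lines, word):
--
--     remaining_text = ""
--     l=""
--     empty=True
--     for line in lines:  # Iterate through the list of lines
--
--         if word in line:
--             remaining_text = line.replace(word,'').strip()
--             if remaining_text=="":
--               empty=False
--
--               continue
--         if empty==False:
--            l=line
--            return l
--
--     return remaining_text
-- ===== SOURCE B (Python) =====
-- def extract_remaining_text_from_list(lines, word):
--     def word_only(line):
--         return word in line and line.replace(word, '').strip() == ''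
--     i = next((k for k, line in enumerate(lines) if word_only(line)), None)
--     if i is None:
--         fallback = ""
--         for line in lines:
--             if word in line:
--                 fallback = line.replace(word, '').strip()
--         return fallback
--     for line in lines[i + 1:]:
--         if not word_only(line):
--             return line
--     return ""
-- ===== Notes on version B (the rewrite author's own statement) =====
-- stated objective: simpler
-- what changed: Replaced A's single loop with mutable remaining_text/empty flags and a mid-loop return by an explicit two-phase decomposition: find the index of the first word-only line, then either return the last stripped remainder (no such line) or the first raw non-word-only line after it.
import Mathlib
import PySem

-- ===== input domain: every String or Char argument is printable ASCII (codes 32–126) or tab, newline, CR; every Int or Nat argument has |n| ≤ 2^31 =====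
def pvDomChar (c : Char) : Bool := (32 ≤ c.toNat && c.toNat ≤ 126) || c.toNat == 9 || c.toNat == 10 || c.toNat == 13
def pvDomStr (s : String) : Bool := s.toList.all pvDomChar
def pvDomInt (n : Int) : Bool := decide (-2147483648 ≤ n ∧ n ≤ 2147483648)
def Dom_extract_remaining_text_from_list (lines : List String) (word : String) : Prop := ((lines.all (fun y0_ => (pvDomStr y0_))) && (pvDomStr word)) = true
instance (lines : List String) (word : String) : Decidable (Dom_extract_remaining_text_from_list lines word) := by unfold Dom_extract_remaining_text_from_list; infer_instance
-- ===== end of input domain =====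

-- B replaces A's single stateful loop (mutable remaining_text/empty flags with a mid-loop return)
-- by an explicit decomposition: find the first word-only line, then either return the last stripped
-- remainder (no such line) or the first non-word-only line after it.  Objective: simpler; same cost.

-- ===== PORT A =====
-- the loop of A: state = (remaining_text, empty); 'return l' is the non-recursive branch
def pvLoopA (word : String) : List String → String → Bool → String
  | [], rt, _ => rt
  | line :: rest, rt, empty =>
    if PySem.Str.isIn word line then
      let r := PySem.Str.strip (PySem.Str.replace line word "")
      if r = "" then pvLoopA word rest r false
      else if empty = false then line else pvLoopA word rest r empty
    else
      if empty = false then line else pvLoopA word rest rt empty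

def extract_remaining_text_from_list (lines : List String) (word : String) : String :=
  pvLoopA word lines "" true

-- ===== PORT B =====
def pvWordOnly (word line : String) : Bool :=
  PySem.Str.isIn word line && PySem.Str.strip (PySem.Str.replace line word "") == ""

-- the fallback pass of B
def pvFallback (word : String) : List String → String → String
  | [], fb => fb
  | line :: rest, fb =>
      pvFallback word rest
        (if PySem.Str.isIn word line then PySem.Str.strip (PySem.Str.replace line word "") else fb)

-- the scan after the first word-only line: first non-word-only line, raw, else ""
def pvScan (word : String) : List String → String
  | [] => ""
  | line :: rest => if pvWordOnly word line then pvScan word rest else line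

def extract_remaining_text_from_list_alt (lines : List String) (word : String) : String :=
  match lines.findIdx? (pvWordOnly word) with
  | none => pvFallback word lines ""
  | some i => pvScan word (lines.drop (i + 1))

-- ===== PRECONDITION & SPEC =====
def Spec_extract_remaining_text_from_list (lines : List String) (word : String) (out : String) : Prop := out = extract_remaining_text_from_list_alt lines word
instance (lines : List String) (word : String) (out : String) : Decidable (Spec_extract_remaining_text_from_list lines word out) := by unfold Spec_extract_remaining_text_from_list; infer_instance

-- ===== CLAIM (what is proved, stated in full; the proofs are below) =====
def Claim_equal_extract_remaining_text_from_list : Prop := ∀ (lines : List String) (word : String), Dom_extract_remaining_text_from_list lines word → Spec_extract_remaining_text_from_list lines word (extract_remaining_text_from_list lines word)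

-- ===== LEMMAS AND PROOFS =====

-- once empty=False, A's loop (with remaining_text = "") returns the first non-word-only line, else ""
theorem pvLoopA_false (word : String) (lines : List String) :
    pvLoopA word lines "" false = pvScan word lines := by
  induction lines with
  | nil => rfl
  | cons line rest ih =>
    by_cases h1 : PySem.Chars.isIn word.toList line.toList = true
    · by_cases h2 : PySem.Str.strip (PySem.Str.replace line word "") = ""
      · simp [pvLoopA, pvScan, pvWordOnly, h1, h2, ih]
      · simp [pvLoopA, pvScan, pvWordOnly, h1, h2]
    · simp [pvLoopA, pvScan, pvWordOnly, h1]

-- A's loop in phase empty=True, against B's decomposition, for any accumulated remaining_text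
theorem pvLoopA_true (word : String) (lines : List String) (rt : String) :
    pvLoopA word lines rt true =
      match lines.findIdx? (pvWordOnly word) with
      | none => pvFallback word lines rt
      | some i => pvScan word (lines.drop (i + 1)) := by
  induction lines generalizing rt with
  | nil => rfl
  | cons line rest ih =>
    by_cases h1 : PySem.Chars.isIn word.toList line.toList = true
    · by_cases h2 : PySem.Str.strip (PySem.Str.replace line word "") = ""
      · have hfalse := pvLoopA_false word rest
        simp [pvLoopA, pvWordOnly, List.findIdx?_cons, h1, h2, hfalse]
      · have hA : pvLoopA word (line :: rest) rt true
            = pvLoopA word rest (PySem.Str.strip (PySem.Str.replace line word "")) true := by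
          simp [pvLoopA, h1, h2]
        rw [hA, ih]
        cases hfi : List.findIdx? (pvWordOnly word) rest <;>
          simp [pvFallback, List.findIdx?_cons, pvWordOnly, h1, h2, hfi]
    · have hA : pvLoopA word (line :: rest) rt true = pvLoopA word rest rt true := by
        simp [pvLoopA, h1]
      rw [hA, ih]
      cases hfi : List.findIdx? (pvWordOnly word) rest <;>
        simp [pvFallback, List.findIdx?_cons, pvWordOnly, h1, hfi]

-- ===== VERDICT (by name: the statement is the Claim_ definition above) =====
theorem extract_remaining_text_from_list_spec : Claim_equal_extract_remaining_text_from_list := by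
  intro lines word _
  unfold Spec_extract_remaining_text_from_list
  unfold extract_remaining_text_from_list extract_remaining_text_from_list_alt
  rw [pvLoopA_true]
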